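-- pv_equiv track=rewrite | github.com/robinduval/LeSerpent | groupe12/snake-algo.py | _simulate_path
-- ===== SOURCE A (Python) =====
-- def _simulate_path(body, path, target):
--     simulated = list(body)
--     grew = False
--     for step in path:
--         simulated.insert(0, step)
--         if step == target and not grew:
--             grew = True
--         else:
--             simulated.pop()
--     return simulated
-- ===== SOURCE B (Python) =====
-- def _simulate_path(body, path, target):
--     grew = 1 if target in path else 0
--     combined = list(reversed(path)) + list(body)
--     return combined[: len(body) + grew]
-- ===== Notes on version B (the rewrite author's own statement) =====
-- stated objective: simpler
-- what changed: Replaces the per-step insert/pop simulation loop by a closed form: the result is reversed(path) ++ body truncated to len(body) plus one if the target lies on the path (growth happens at most once).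
import Mathlib
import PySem

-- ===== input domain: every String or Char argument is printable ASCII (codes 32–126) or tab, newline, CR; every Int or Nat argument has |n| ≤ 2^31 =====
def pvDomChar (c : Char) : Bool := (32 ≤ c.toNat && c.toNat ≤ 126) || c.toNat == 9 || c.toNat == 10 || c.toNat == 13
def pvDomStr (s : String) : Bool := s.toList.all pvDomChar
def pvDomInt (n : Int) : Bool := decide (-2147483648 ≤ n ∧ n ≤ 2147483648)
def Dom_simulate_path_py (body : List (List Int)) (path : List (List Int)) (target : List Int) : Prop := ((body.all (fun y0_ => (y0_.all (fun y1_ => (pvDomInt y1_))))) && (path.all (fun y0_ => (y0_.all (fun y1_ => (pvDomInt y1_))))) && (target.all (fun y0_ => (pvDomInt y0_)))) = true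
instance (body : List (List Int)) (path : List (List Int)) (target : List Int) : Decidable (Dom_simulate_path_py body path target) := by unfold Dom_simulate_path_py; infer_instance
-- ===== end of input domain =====

-- B replaces the per-step insert/pop loop by a closed form (reversed path ++ body, truncated); objective: simpler.

-- ===== PORT A =====
-- literal port of A: fold the path, pushing each step in front and popping the
-- tail unless this is the single growth step (step == target and not grew yet)
def simulate_path_py (body : List (List Int)) (path : List (List Int)) (target : List Int) : List (List Int) :=
  (path.foldl
    (fun (st : List (List Int) × Bool) step =>
      let sim := step :: st.1
      if step = target ∧ st.2 = false then (sim, true)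
      else (sim.dropLast, st.2))
    (body, false)).1

-- ===== PORT B =====
def simulate_path_py_alt (body : List (List Int)) (path : List (List Int)) (target : List Int) : List (List Int) :=
  let grew : Nat := if target ∈ path then 1 else 0
  (path.reverse ++ body).take (body.length + grew)

-- ===== PRECONDITION & SPEC =====
def Spec_simulate_path_py (body : List (List Int)) (path : List (List Int)) (target : List Int) (out : List (List Int)) : Prop := out = simulate_path_py_alt body path target
instance (body : List (List Int)) (path : List (List Int)) (target : List Int) (out : List (List Int)) : Decidable (Spec_simulate_path_py body path target out) := by unfold Spec_simulate_path_py; infer_instance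

-- ===== CLAIM (what is proved, stated in full; the proofs are below) =====
def Claim_equal_simulate_path_py : Prop := ∀ (body : List (List Int)) (path : List (List Int)) (target : List Int), Dom_simulate_path_py body path target → Spec_simulate_path_py body path target (simulate_path_py body path target)

-- ===== LEMMAS AND PROOFS =====

-- loop invariant of A's fold: starting from state (s, b), the simulated list is
-- the (|s| + growth)-prefix of reversed(path) ++ s, where growth is 1 iff the
-- growth step is still available (b = false) and target occurs in path.
lemma sim_aux (target : List Int) :
    ∀ (path : List (List Int)) (s : List (List Int)) (b : Bool),
    (path.foldl
      (fun (st : List (List Int) × Bool) step =>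
        let sim := step :: st.1
        if step = target ∧ st.2 = false then (sim, true)
        else (sim.dropLast, st.2))
      (s, b)).1
    = (path.reverse ++ s).take (s.length + (if b then 0 else (if target ∈ path then 1 else 0))) := by
  intro path
  induction path with
  | nil =>
    intro s b
    simp
  | cons step rest ih =>
    intro s b
    simp only [List.foldl_cons]
    by_cases hgrow : step = target ∧ b = false
    · rw [if_pos hgrow]
      rw [ih (step :: s) true]
      obtain ⟨hst, hb⟩ := hgrow
      subst hst hb
      simp [List.mem_cons, List.append_assoc]
    · rw [if_neg hgrow]
      rw [ih ((step :: s).dropLast) b]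
      have hlen : ((step :: s).dropLast).length = s.length := by simp
      -- step :: s = dropLast ++ [last]
      have hsplit : (step :: s) = (step :: s).dropLast ++ [(step :: s).getLast (by simp)] :=
        (List.dropLast_append_getLast (by simp)).symm
      have key : ∀ n, n ≤ rest.length + s.length →
          (rest.reverse ++ (step :: s).dropLast).take n
          = ((step :: rest).reverse ++ s).take n := by
        intro n hn
        have : (step :: rest).reverse ++ s
            = (rest.reverse ++ (step :: s).dropLast) ++ [(step :: s).getLast (by simp)] := by
          calc (step :: rest).reverse ++ s = rest.reverse ++ (step :: s) := by
                simp [List.append_assoc]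
            _ = rest.reverse ++ ((step :: s).dropLast ++ [(step :: s).getLast (by simp)]) := by
                rw [← hsplit]
            _ = (rest.reverse ++ (step :: s).dropLast) ++ [(step :: s).getLast (by simp)] := by
                simp [List.append_assoc]
        rw [this]
        exact (List.take_append_of_le_length
          (by rw [List.length_append, List.length_reverse, hlen]; omega)).symm
      cases b with
      | true =>
        rw [hlen]
        exact key (s.length + 0) (by omega)
      | false =>
        have hne : step ≠ target := by
          intro h; exact hgrow ⟨h, rfl⟩
        have hmem : (target ∈ step :: rest) = (target ∈ rest) := by
          simp [List.mem_cons, Ne.symm hne]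
        simp only [Bool.false_eq_true, if_neg (by simp : ¬ (False : Prop)) ]
        rw [hlen]
        by_cases hm : target ∈ rest
        · have hm' : target ∈ step :: rest := List.mem_cons_of_mem _ hm
          rw [if_pos hm, if_pos hm']
          have hrest : rest ≠ [] := by rintro rfl; simp at hm
          have : 1 ≤ rest.length := by
            cases rest with
            | nil => exact absurd rfl hrest
            | cons _ _ => simp
          exact key (s.length + 1) (by omega)
        · have hm' : target ∉ step :: rest := by
            simp [List.mem_cons]; exact ⟨Ne.symm hne, hm⟩
          rw [if_neg hm, if_neg hm']
          exact key (s.length + 0) (by omega)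

-- ===== VERDICT (by name: the statement is the Claim_ definition above) =====
theorem simulate_path_py_spec : Claim_equal_simulate_path_py := by
  intro body path target _
  unfold Spec_simulate_path_py simulate_path_py simulate_path_py_alt
  rw [sim_aux]
  simp
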